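-- pv_equiv track=rewrite | github.com/JustSNguyen/LeetCode | DailyProblems/2610.py | findMatrix
-- ===== SOURCE A (Python) =====
-- from typing import List
-- from collections import defaultdict
--
-- def findMatrix(nums: List[int]) -> List[List[int]]:
--     count = defaultdict(int)
--     rows = []
--
--     for num in nums:
--         count[num] += 1
--
--         if count[num] > len(rows):
--             rows.append([num])
--         else:
--             rows[count[num] - 1].append(num)
--
--     return rows
-- ===== SOURCE B (Python) =====
-- from typing import List
--
-- def findMatrix(nums: List[int]) -> List[List[int]]:
--     count = {}
--     ranks = []
--     for num in nums:
--         count[num] = count.get(num, 0) + 1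
--         ranks.append(count[num])
--     maxrank = max(ranks, default=0)
--     return [[num for num, r in zip(nums, ranks) if r == k]
--             for k in range(1, maxrank + 1)]
-- ===== Notes on version B (the rewrite author's own statement) =====
-- stated objective: alternative
-- what changed: B first assigns every element its 1-based occurrence rank in one counting pass, then builds each row by filtering the (num, rank) pairs for each rank, instead of A's single pass that appends into (or extends) a growing list of rows.
import Mathlib
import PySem

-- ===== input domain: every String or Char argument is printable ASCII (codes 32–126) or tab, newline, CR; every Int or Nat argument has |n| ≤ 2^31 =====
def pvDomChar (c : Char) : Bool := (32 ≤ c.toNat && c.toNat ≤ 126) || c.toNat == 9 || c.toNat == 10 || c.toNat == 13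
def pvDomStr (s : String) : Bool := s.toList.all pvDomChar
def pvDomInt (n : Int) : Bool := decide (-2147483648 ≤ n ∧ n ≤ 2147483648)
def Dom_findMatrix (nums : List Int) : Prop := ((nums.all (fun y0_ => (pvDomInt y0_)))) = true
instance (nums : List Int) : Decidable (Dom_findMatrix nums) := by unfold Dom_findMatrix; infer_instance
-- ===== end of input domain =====

-- B restructures A (one pass appending into a growing row list) as: one counting pass
-- assigning each element its occurrence rank, then one filtering pass per rank; same cost class.

-- ===== PORT A =====
-- the loop body of A: count[num] += 1; append to a new or existing row
def findMatrixStep (s : PySem.Dict Int Int × List (List Int)) (num : Int) :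
    PySem.Dict Int Int × List (List Int) :=
  let c := s.1.modify num 0 (· + 1)
  let cnt := c.getD num 0
  if (s.2.length : Int) < cnt then (c, s.2 ++ [[num]])
  else (c, s.2.modify (cnt - 1).toNat (· ++ [num]))

def findMatrix (nums : List Int) : List (List Int) :=
  (nums.foldl findMatrixStep (PySem.Dict.empty, [])).2

-- ===== PORT B =====
-- first pass of B: count[num] = count.get(num, 0) + 1; ranks.append(count[num])
def findMatrixAltStep (s : PySem.Dict Int Int × List Int) (num : Int) :
    PySem.Dict Int Int × List Int :=
  let cnt := s.1.getD num 0 + 1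
  (s.1.insert num cnt, s.2 ++ [cnt])

def findMatrix_alt (nums : List Int) : List (List Int) :=
  let ranks := (nums.foldl findMatrixAltStep (PySem.Dict.empty, [])).2
  let maxrank := PySem.List.maxD ranks (fun r => r) 0
  (PySem.List.pyRange 1 (maxrank + 1) 1).map (fun k =>
    ((nums.zip ranks).filter (fun p => p.2 == k)).map Prod.fst)

-- ===== PRECONDITION & SPEC =====
def Spec_findMatrix (nums : List Int) (out : List (List Int)) : Prop := out = findMatrix_alt nums
instance (nums : List Int) (out : List (List Int)) : Decidable (Spec_findMatrix nums out) := by unfold Spec_findMatrix; infer_instance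

-- ===== CLAIM (what is proved, stated in full; the proofs are below) =====
def Claim_equal_findMatrix : Prop := ∀ (nums : List Int), Dom_findMatrix nums → Spec_findMatrix nums (findMatrix nums)

-- ===== LEMMAS AND PROOFS =====

-- the list of 1-based occurrence ranks of the elements of l, starting from counts c
def ranksOf (c : PySem.Dict Int Int) : List Int → List Int
  | [] => []
  | n :: t => (c.getD n 0 + 1) :: ranksOf (c.insert n (c.getD n 0 + 1)) t

theorem ranksOf_congr (l : List Int) (c c' : PySem.Dict Int Int)
    (h : ∀ k, c.getD k 0 = c'.getD k 0) : ranksOf c l = ranksOf c' l := by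
  induction l generalizing c c' with
  | nil => rfl
  | cons n t ih =>
    simp only [ranksOf, h n]
    refine congrArg _ (ih _ _ ?_)
    intro k
    rw [PySem.Dict.getD_insert, PySem.Dict.getD_insert, h k]

theorem ranksOf_pos (l : List Int) (c : PySem.Dict Int Int)
    (hc : ∀ k, 0 ≤ c.getD k 0) : ∀ r ∈ ranksOf c l, 1 ≤ r := by
  induction l generalizing c with
  | nil => simp [ranksOf]
  | cons n t ih =>
    intro r hr
    simp only [ranksOf, List.mem_cons] at hr
    rcases hr with h | h
    · have := hc n; omega
    · refine ih _ ?_ r h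
      intro k
      rw [PySem.Dict.getD_insert]
      split
      · have := hc n; omega
      · exact hc k

theorem altFold_snd (l : List Int) (c : PySem.Dict Int Int) (acc : List Int) :
    (l.foldl findMatrixAltStep (c, acc)).2 = acc ++ ranksOf c l := by
  induction l generalizing c acc with
  | nil => simp [ranksOf]
  | cons n t ih =>
    simp only [List.foldl_cons, findMatrixAltStep, ranksOf]
    rw [ih]
    simp

theorem getD_append_single {α : Type} (rows : List α) (x : α) (i : ℕ) (d : α) :
    (rows ++ [x]).getD i d = if i = rows.length then x else rows.getD i d := by
  simp only [List.getD, List.getElem?_append]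
  by_cases h : i < rows.length
  · simp [h, Nat.ne_of_lt h]
  · by_cases h2 : i = rows.length
    · simp [h2]
    · rw [if_neg h, if_neg h2]
      rw [List.getElem?_eq_none (l := rows) (by omega)]
      have : [x][i - rows.length]? = none := List.getElem?_eq_none (by simp; omega)
      simp [this]

theorem getD_modify {α : Type} (rows : List α) (j : ℕ) (f : α → α) (i : ℕ) (d : α)
    (hj : j < rows.length) :
    (rows.modify j f).getD i d = if i = j then f (rows.getD i d) else rows.getD i d := by
  simp only [List.getD, List.getElem?_modify]
  by_cases h : i = j
  · subst h
    rw [List.getElem?_eq_getElem hj]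
    simp
  · rw [if_neg h]
    cases rows[i]? with
    | none => simp
    | some v => simp [Ne.symm h]

theorem foldl_max_zero_cons (x : Int) (l : List Int) :
    (x :: l).foldl max 0 = max x (l.foldl max 0) := by
  rw [List.foldl_cons, max_comm 0 x, List.foldl_assoc]

-- the main invariant of A's fold: starting from counts c (all between 0 and rows.length),
-- the final rows have length max rows.length (max rank) and row i is the old row i
-- followed by the remaining elements of rank i+1, in order.
theorem mainFold (l : List Int) (c : PySem.Dict Int Int) (rows : List (List Int))
    (hc : ∀ k, 0 ≤ c.getD k 0 ∧ c.getD k 0 ≤ (rows.length : Int)) :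
    ((l.foldl findMatrixStep (c, rows)).2.length : Int)
        = max (rows.length : Int) ((ranksOf c l).foldl max 0)
    ∧ ∀ i : ℕ, (l.foldl findMatrixStep (c, rows)).2.getD i []
        = rows.getD i [] ++ ((l.zip (ranksOf c l)).filter (fun p => p.2 == (i : Int) + 1)).map Prod.fst := by
  induction l generalizing c rows with
  | nil =>
    refine ⟨by simp [ranksOf], ?_⟩
    intro i
    simp [ranksOf]
  | cons n t ih =>
    have hcnt := hc n
    -- step unfolding
    have hgd : (c.modify n 0 (· + 1)).getD n 0 = c.getD n 0 + 1 :=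
      PySem.Dict.getD_modify_self c n 0 (· + 1)
    have hptwise : ∀ k, (c.modify n 0 (· + 1)).getD k 0 = (c.insert n (c.getD n 0 + 1)).getD k 0 := by
      intro k
      rw [PySem.Dict.getD_modify, PySem.Dict.getD_insert]
    have hranks : ranksOf (c.modify n 0 (· + 1)) t = ranksOf (c.insert n (c.getD n 0 + 1)) t :=
      ranksOf_congr t _ _ hptwise
    simp only [List.foldl_cons, findMatrixStep, hgd]
    by_cases hbig : (rows.length : Int) < c.getD n 0 + 1
    · -- new row appended; cnt = rows.length + 1
      have hceq : c.getD n 0 = (rows.length : Int) := by omega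
      rw [if_pos hbig]
      have hc' : ∀ k, 0 ≤ (c.modify n 0 (· + 1)).getD k 0 ∧
          (c.modify n 0 (· + 1)).getD k 0 ≤ ((rows ++ [[n]]).length : Int) := by
        intro k
        rw [hptwise k, PySem.Dict.getD_insert]
        simp only [List.length_append, List.length_cons, List.length_nil]
        split
        · refine ⟨by omega, by push_cast; omega⟩
        · have := hc k
          refine ⟨by omega, by push_cast; omega⟩
      obtain ⟨ihlen, ihget⟩ := ih (c.modify n 0 (· + 1)) (rows ++ [[n]]) hc'
      constructor
      · rw [ihlen, hranks]
        simp only [ranksOf]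
        rw [foldl_max_zero_cons]
        have hb : (rows ++ [[n]]).length = rows.length + 1 := by simp
        rw [hb]
        push_cast
        omega
      · intro i
        rw [ihget i, hranks]
        simp only [ranksOf, List.zip_cons_cons, List.filter_cons]
        by_cases hi : (i : Int) = c.getD n 0
        · have hieq : i = rows.length := by omega
          have : ((c.getD n 0 + 1) == ((i : Int) + 1)) = true := by simp [hi]
          rw [this]
          rw [getD_append_single, if_pos hieq, List.getD_eq_getElem?_getD,
            List.getElem?_eq_none (by omega), Option.getD_none]
          simp
        · have : ((c.getD n 0 + 1) == ((i : Int) + 1)) = false := by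
            simp; omega
          rw [this]
          simp only [Bool.false_eq_true, if_false]
          rw [getD_append_single, if_neg (by omega)]
    · -- existing row extended; 1 ≤ cnt ≤ rows.length
      rw [if_neg hbig]
      have hlt : (c.getD n 0 + 1 - 1).toNat < rows.length := by omega
      have hidx : (c.getD n 0 + 1 - 1).toNat = (c.getD n 0).toNat := by omega
      have hc' : ∀ k, 0 ≤ (c.modify n 0 (· + 1)).getD k 0 ∧
          (c.modify n 0 (· + 1)).getD k 0 ≤ ((rows.modify (c.getD n 0 + 1 - 1).toNat (· ++ [n])).length : Int) := by
        intro k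
        rw [hptwise k, PySem.Dict.getD_insert, List.length_modify]
        split
        · omega
        · exact hc k
      obtain ⟨ihlen, ihget⟩ := ih (c.modify n 0 (· + 1)) _ hc'
      constructor
      · rw [ihlen, hranks, List.length_modify]
        simp only [ranksOf]
        rw [foldl_max_zero_cons]
        omega
      · intro i
        rw [ihget i, hranks]
        simp only [ranksOf, List.zip_cons_cons, List.filter_cons]
        by_cases hi : (i : Int) = c.getD n 0
        · have : ((c.getD n 0 + 1) == ((i : Int) + 1)) = true := by simp [hi]
          rw [this]
          rw [getD_modify _ _ _ _ _ hlt, if_pos (by omega)]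
          simp
        · have : ((c.getD n 0 + 1) == ((i : Int) + 1)) = false := by
            simp; omega
          rw [this]
          simp only [Bool.false_eq_true, if_false]
          rw [getD_modify _ _ _ _ _ hlt, if_neg (by omega)]

theorem foldl_max_nonneg (l : List Int) : 0 ≤ l.foldl max 0 := by
  have : ∀ (a : Int), 0 ≤ a → 0 ≤ l.foldl max a := by
    induction l with
    | nil => intro a ha; simpa using ha
    | cons x t ih => intro a ha; exact ih _ (le_trans ha (le_max_left a x))
  exact this 0 le_rfl

theorem maxD_eq_foldl (l : List Int) (hl : ∀ r ∈ l, 0 ≤ r) :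
    PySem.List.maxD l (fun r => r) 0 = l.foldl max 0 := by
  cases l with
  | nil => rfl
  | cons x t =>
    have : PySem.List.maxD (x :: t) (fun r => r) 0
        = (PySem.List.max? (x :: t) (fun r => r)).getD 0 := rfl
    rw [this, PySem.List.max?_id_cons]
    simp only [Option.getD_some, List.foldl_cons]
    have hx : max 0 x = x := by
      have := hl x (List.mem_cons_self ..)
      omega
    rw [hx]

-- ===== VERDICT (by name: the statement is the Claim_ definition above) =====
theorem findMatrix_spec : Claim_equal_findMatrix := by
  intro nums _
  unfold Spec_findMatrix findMatrix findMatrix_alt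
  have hranksB : (nums.foldl findMatrixAltStep (PySem.Dict.empty, [])).2
      = ranksOf PySem.Dict.empty nums := by
    rw [altFold_snd]; simp
  rw [hranksB]
  set R := ranksOf PySem.Dict.empty nums with hR
  have hpos : ∀ r ∈ R, 1 ≤ r :=
    ranksOf_pos nums PySem.Dict.empty (by simp [PySem.Dict.getD_empty])
  obtain ⟨hlen, hget⟩ := mainFold nums PySem.Dict.empty []
    (by intro k; simp [PySem.Dict.getD_empty])
  set res := (nums.foldl findMatrixStep (PySem.Dict.empty, [])).2 with hres
  rw [← hR] at hlen hget
  have hM : PySem.List.maxD R (fun r => r) 0 = R.foldl max 0 :=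
    maxD_eq_foldl R (fun r hr => le_trans (by omega) (hpos r hr))
  simp only [hM]
  have hlen' : (res.length : Int) = R.foldl max 0 := by
    rw [hlen]
    have := foldl_max_nonneg R
    simp only [List.length_nil, Int.natCast_zero]
    omega
  apply List.ext_getElem
  · -- lengths
    rw [List.length_map, PySem.List.length_pyRange_one]
    omega
  · intro i h1 h2
    rw [List.getElem_map, PySem.List.getElem_pyRange_one]
    have hi : i < res.length := h1
    have := hget i
    rw [List.getD_eq_getElem res [] hi] at this
    simp only [List.getD, List.getElem?_nil, Option.getD_none, List.nil_append] at this
    rw [this]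
    congr 2
    funext p
    congr 1
    omega
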